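-- pv_equiv track=rewrite | github.com/chiennt0109/tin247ctp | arena/games/robot_step.py | generate_grid_with_robot_at
-- ===== SOURCE A (Python) =====
-- GRID_SIZE = 10
--
-- def generate_grid_with_robot_at(x, y):
--     grid = []
--     for r in range(GRID_SIZE):
--         row = ""
--         for c in range(GRID_SIZE):
--             row += "R" if (r == x and c == y) else "."
--         grid.append(row)
--     return grid
-- ===== SOURCE B (Python) =====
-- GRID_SIZE = 10
--
-- def generate_grid_with_robot_at(x, y):
--     rows = []
--     for r in range(GRID_SIZE):
--         if r == x and 0 <= y < GRID_SIZE: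
--             rows.append("." * y + "R" + "." * (GRID_SIZE - 1 - y))
--         else:
--             rows.append("." * GRID_SIZE)
--     return rows
-- ===== Notes on version B (the rewrite author's own statement) =====
-- stated objective: simpler
-- what changed: Replaced the inner per-cell loop with direct per-row string construction: a marked row is built in closed form as '.'*y + 'R' + '.'*(GRID_SIZE-1-y) (gated by 0 <= y < GRID_SIZE), other rows are '.'*GRID_SIZE.
import Mathlib
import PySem

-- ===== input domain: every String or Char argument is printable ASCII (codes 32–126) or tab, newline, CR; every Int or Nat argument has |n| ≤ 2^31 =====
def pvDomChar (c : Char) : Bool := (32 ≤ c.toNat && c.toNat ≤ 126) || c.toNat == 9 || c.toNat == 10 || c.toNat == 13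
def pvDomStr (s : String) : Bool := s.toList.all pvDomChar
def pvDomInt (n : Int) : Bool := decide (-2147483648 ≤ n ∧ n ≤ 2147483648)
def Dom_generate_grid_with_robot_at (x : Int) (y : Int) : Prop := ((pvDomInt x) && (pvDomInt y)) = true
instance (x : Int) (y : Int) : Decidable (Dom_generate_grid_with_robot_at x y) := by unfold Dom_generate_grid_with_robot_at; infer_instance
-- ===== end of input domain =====

-- ===== PORT A =====
-- Header: B builds each row in closed form ('.'*y + 'R' + '.'*(9-y), guarded) instead of A's inner per-cell loop; objective: simpler.
def generate_grid_with_robot_at (x : Int) (y : Int) : List String :=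
  (PySem.List.pyRange 0 10 1).foldl (fun grid r =>
    grid ++ [String.mk ((PySem.List.pyRange 0 10 1).foldl
      (fun row c => row ++ [if r = x ∧ c = y then 'R' else '.']) [])]) []

-- ===== PORT B =====
def generate_grid_with_robot_at_alt (x : Int) (y : Int) : List String :=
  (PySem.List.pyRange 0 10 1).foldl (fun rows r =>
    rows ++ [if r = x ∧ 0 ≤ y ∧ y < 10 then
        String.mk (List.replicate y.toNat '.' ++ ['R'] ++ List.replicate (10 - 1 - y).toNat '.')
      else String.mk (List.replicate 10 '.')]) []

-- ===== PRECONDITION & SPEC =====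
def Spec_generate_grid_with_robot_at (x : Int) (y : Int) (out : List String) : Prop := out = generate_grid_with_robot_at_alt x y
instance (x : Int) (y : Int) (out : List String) : Decidable (Spec_generate_grid_with_robot_at x y out) := by unfold Spec_generate_grid_with_robot_at; infer_instance

-- ===== CLAIM (what is proved, stated in full; the proofs are below) =====
def Claim_equal_generate_grid_with_robot_at : Prop := ∀ (x : Int) (y : Int), Dom_generate_grid_with_robot_at x y → Spec_generate_grid_with_robot_at x y (generate_grid_with_robot_at x y)

-- ===== LEMMAS AND PROOFS =====

lemma row_eq (x y r : Int) :
    String.mk ((PySem.List.pyRange 0 10 1).foldl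
      (fun row c => row ++ [if r = x ∧ c = y then 'R' else '.']) []) =
    (if r = x ∧ 0 ≤ y ∧ y < 10 then
        String.mk (List.replicate y.toNat '.' ++ ['R'] ++ List.replicate (10 - 1 - y).toNat '.')
      else String.mk (List.replicate 10 '.')) := by
  rw [show PySem.List.pyRange 0 10 1 = [0,1,2,3,4,5,6,7,8,9] from by decide]
  by_cases hx : r = x
  · subst hx
    by_cases hy : 0 ≤ y ∧ y < 10
    · obtain ⟨h1, h2⟩ := hy
      interval_cases y <;> simp
    · rw [if_neg (by tauto)]
      simp only [List.foldl]
      rw [if_neg (by rintro ⟨-, h⟩; omega), if_neg (by rintro ⟨-, h⟩; omega),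
          if_neg (by rintro ⟨-, h⟩; omega), if_neg (by rintro ⟨-, h⟩; omega),
          if_neg (by rintro ⟨-, h⟩; omega), if_neg (by rintro ⟨-, h⟩; omega),
          if_neg (by rintro ⟨-, h⟩; omega), if_neg (by rintro ⟨-, h⟩; omega),
          if_neg (by rintro ⟨-, h⟩; omega), if_neg (by rintro ⟨-, h⟩; omega)]
      rfl
  · rw [if_neg (by tauto)]
    simp only [List.foldl]
    rw [if_neg (by rintro ⟨h, -⟩; exact hx h), if_neg (by rintro ⟨h, -⟩; exact hx h),
        if_neg (by rintro ⟨h, -⟩; exact hx h), if_neg (by rintro ⟨h, -⟩; exact hx h),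
        if_neg (by rintro ⟨h, -⟩; exact hx h), if_neg (by rintro ⟨h, -⟩; exact hx h),
        if_neg (by rintro ⟨h, -⟩; exact hx h), if_neg (by rintro ⟨h, -⟩; exact hx h),
        if_neg (by rintro ⟨h, -⟩; exact hx h), if_neg (by rintro ⟨h, -⟩; exact hx h)]
    rfl

-- ===== VERDICT (by name: the statement is the Claim_ definition above) =====
theorem generate_grid_with_robot_at_spec : Claim_equal_generate_grid_with_robot_at := by
  intro x y _
  unfold Spec_generate_grid_with_robot_at generate_grid_with_robot_at generate_grid_with_robot_at_alt
  have h : (fun (grid : List String) (r : Int) =>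
      grid ++ [String.mk ((PySem.List.pyRange 0 10 1).foldl
        (fun row c => row ++ [if r = x ∧ c = y then 'R' else '.']) [])]) =
      (fun (rows : List String) (r : Int) =>
      rows ++ [if r = x ∧ 0 ≤ y ∧ y < 10 then
          String.mk (List.replicate y.toNat '.' ++ ['R'] ++ List.replicate (10 - 1 - y).toNat '.')
        else String.mk (List.replicate 10 '.')]) := by
    funext g r; rw [row_eq]
  rw [h]
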